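-- pv_equiv track=rewrite | github.com/Dustzx/DEformer | data_utils.py | count_permutations_overlap
-- ===== SOURCE A (Python) =====
-- def count_permutations_overlap(seq1, seq2):
--     """
--     计算两个序列内多个元素的所有形式排列组合的重合次数
--     """
--     # 将序列转换为集合
--     set1 = set(seq1)
--     set2 = set(seq2)
--
--     # 计算交集
--     set3 = set1 & set2
--
--     # 遍历交集中的每个元素，计算出现次数并累加
--     overlap_count = 0
--     for elem in set3:
--         count1 = seq1.count(elem)
--         count2 = seq2.count(elem)
--         overlap_count += min(count1, count2)
--
--     return overlap_count
-- ===== SOURCE B (Python) =====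
-- def count_permutations_overlap(seq1, seq2):
--     """
--     Same result as A, computed as one consuming pass over seq1 against a
--     count budget built once from seq2 (no set intersection, no min()).
--     """
--     budget = {}
--     for x in seq2:
--         budget[x] = budget.get(x, 0) + 1
--     result = 0
--     for x in seq1:
--         if budget.get(x, 0) > 0:
--             budget[x] = budget[x] - 1
--             result += 1
--     return result
-- ===== Notes on version B (the rewrite author's own statement) =====
-- stated objective: faster
-- what changed: Replaces set-intersection plus per-distinct-element seq1.count/seq2.count scans and min() with a single seq2 counter dict consumed in one pass over seq1.
import Mathlib
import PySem

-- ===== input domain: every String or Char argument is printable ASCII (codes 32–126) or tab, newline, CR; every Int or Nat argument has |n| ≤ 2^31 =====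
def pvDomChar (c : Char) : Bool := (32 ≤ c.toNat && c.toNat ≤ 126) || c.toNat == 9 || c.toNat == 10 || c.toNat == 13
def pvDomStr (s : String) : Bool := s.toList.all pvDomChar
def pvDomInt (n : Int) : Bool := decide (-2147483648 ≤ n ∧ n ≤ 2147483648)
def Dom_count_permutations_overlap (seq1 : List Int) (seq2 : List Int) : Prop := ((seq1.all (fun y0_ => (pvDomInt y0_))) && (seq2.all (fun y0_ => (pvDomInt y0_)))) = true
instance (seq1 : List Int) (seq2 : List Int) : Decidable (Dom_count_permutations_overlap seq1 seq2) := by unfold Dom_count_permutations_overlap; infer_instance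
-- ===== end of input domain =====

-- B replaces A's set-intersection + per-element count scans with one consuming
-- pass over seq1 against a count dict built once from seq2 (objective: faster).

-- ===== PORT A =====
-- set1 = set(seq1); set2 = set(seq2); set3 = set1 & set2; then sum over set3 of
-- min(seq1.count(elem), seq2.count(elem)).  (The sum is iteration-order independent.)
def count_permutations_overlap (seq1 : List Int) (seq2 : List Int) : Int :=
  let set1 := PySem.Set.ofList seq1
  let set2 := PySem.Set.ofList seq2
  let set3 := PySem.Set.inter set1 set2
  set3.foldl
    (fun overlap_count elem =>
      let count1 : Int := PySem.List.count seq1 elem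
      let count2 : Int := PySem.List.count seq2 elem
      overlap_count + min count1 count2)
    0

-- ===== PORT B =====
-- budget = counts of seq2 built by one loop; then for x in seq1: consume-decrement.
def count_permutations_overlap_alt (seq1 : List Int) (seq2 : List Int) : Int :=
  let budget : PySem.Dict Int Int :=
    seq2.foldl (fun d x => d.insert x (d.getD x 0 + 1)) PySem.Dict.empty
  let final :=
    seq1.foldl
      (fun (st : PySem.Dict Int Int × Int) x =>
        if st.1.getD x 0 > 0 then (st.1.insert x (st.1.getD x 0 - 1), st.2 + 1) else st)
      (budget, 0)
  final.2

-- ===== PRECONDITION & SPEC =====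
def Spec_count_permutations_overlap (seq1 : List Int) (seq2 : List Int) (out : Int) : Prop := out = count_permutations_overlap_alt seq1 seq2
instance (seq1 : List Int) (seq2 : List Int) (out : Int) : Decidable (Spec_count_permutations_overlap seq1 seq2 out) := by unfold Spec_count_permutations_overlap; infer_instance

-- ===== CLAIM (what is proved, stated in full; the proofs are below) =====
def Claim_equal_count_permutations_overlap : Prop := ∀ (seq1 : List Int) (seq2 : List Int), Dom_count_permutations_overlap seq1 seq2 → Spec_count_permutations_overlap seq1 seq2 (count_permutations_overlap seq1 seq2)

-- ===== LEMMAS AND PROOFS =====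

-- Common value both sides are proved equal to: the size of the multiset intersection.
def pvInterCard (s1 s2 : List Int) : ℕ := ((s1 : Multiset Int) ∩ (s2 : Multiset Int)).card

-- A-side: summing min-counts over any nodup list whose members are exactly the
-- common elements gives the multiset-intersection cardinality.
lemma sum_min_counts (s1 s2 : List Int) (L : List Int) (hnd : L.Nodup)
    (hmem : ∀ x, x ∈ L ↔ x ∈ s1 ∧ x ∈ s2) :
    L.foldl (fun acc e => acc + min ((PySem.List.count s1 e : Int)) ((PySem.List.count s2 e : Int))) 0
      = (pvInterCard s1 s2 : Int) := by
  rw [PySem.List.foldl_add, zero_add]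
  have h1 : ∀ (M : List Int), (M.map (fun e => min ((PySem.List.count s1 e : Int)) ((PySem.List.count s2 e : Int)))).sum
      = ((M.map (fun e => min (s1.count e) (s2.count e))).sum : ℕ) := by
    intro M
    induction M with
    | nil => simp
    | cons a t ih =>
        simp only [List.map_cons, List.sum_cons, ih]
        simp [PySem.List.count]
  rw [h1]
  congr 1
  rw [← List.sum_toFinset _ hnd]
  have h2 : ∀ e : Int, min (s1.count e) (s2.count e)
      = Multiset.count e (((s1 : Multiset Int)) ∩ (s2 : Multiset Int)) := by
    intro e; rw [Multiset.count_inter]; simp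
  have h3 : L.toFinset = (((s1 : Multiset Int)) ∩ (s2 : Multiset Int)).toFinset := by
    ext x
    simp [hmem]
  calc L.toFinset.sum (fun e => min (s1.count e) (s2.count e))
      = (((s1 : Multiset Int)) ∩ (s2 : Multiset Int)).toFinset.sum
          (fun e => Multiset.count e (((s1 : Multiset Int)) ∩ (s2 : Multiset Int))) := by
        rw [h3]; exact Finset.sum_congr rfl (fun x _ => h2 x)
    _ = pvInterCard s1 s2 := Multiset.toFinset_sum_count_eq _

-- B-side: the consuming loop computes res + |seq1 ∩ b| whenever the dict's
-- counts agree with the multiset b.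
lemma consume_loop (s1 : List Int) (d : PySem.Dict Int Int) (b : Multiset Int) (res : Int)
    (h : ∀ x, d.getD x 0 = (b.count x : Int)) :
    (s1.foldl
      (fun (st : PySem.Dict Int Int × Int) x =>
        if st.1.getD x 0 > 0 then (st.1.insert x (st.1.getD x 0 - 1), st.2 + 1) else st)
      (d, res)).2 = res + ((((s1 : List Int) : Multiset Int)) ∩ b).card := by
  induction s1 generalizing d b res with
  | nil => simp
  | cons x xs ih =>
    have hcoe : ((x :: xs : List Int) : Multiset Int) = x ::ₘ (xs : Multiset Int) := rfl
    by_cases hx : x ∈ b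
    · have hpos : d.getD x 0 > 0 := by
        rw [h x]
        exact_mod_cast Multiset.count_pos.mpr hx
      have h1 : 1 ≤ b.count x := Multiset.one_le_count_iff_mem.mpr hx
      have h' : ∀ y, (d.insert x (d.getD x 0 - 1)).getD y 0 = ((b.erase x).count y : Int) := by
        intro y
        rw [PySem.Dict.getD_insert]
        by_cases hy : y = x
        · subst hy
          rw [if_pos rfl, h y, Multiset.count_erase_self]
          push_cast [h1]
          ring
        · rw [if_neg hy, h y, Multiset.count_erase_of_ne hy]
      simp only [List.foldl_cons, if_pos hpos]
      rw [ih _ _ _ h']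
      rw [hcoe, Multiset.cons_inter_of_pos _ hx, Multiset.card_cons]
      push_cast
      ring
    · have hneg : ¬ d.getD x 0 > 0 := by
        rw [h x, Multiset.count_eq_zero_of_notMem hx]
        decide
      simp only [List.foldl_cons, if_neg hneg]
      rw [ih _ _ _ h]
      rw [hcoe, Multiset.cons_inter_of_neg _ hx]

lemma a_eq_interCard (s1 s2 : List Int) :
    count_permutations_overlap s1 s2 = (pvInterCard s1 s2 : Int) := by
  unfold count_permutations_overlap
  apply sum_min_counts
  · exact PySem.Set.nodup_inter _ _ (PySem.Set.nodup_ofList s1)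
  · intro x
    rw [PySem.Set.mem_inter, PySem.Set.mem_ofList, PySem.Set.mem_ofList]

lemma b_eq_interCard (s1 s2 : List Int) :
    count_permutations_overlap_alt s1 s2 = (pvInterCard s1 s2 : Int) := by
  unfold count_permutations_overlap_alt
  rw [consume_loop s1 _ (s2 : Multiset Int) 0
      (by intro x
          rw [PySem.Dict.getD_foldl_insert_add_one, PySem.Dict.getD_empty]
          simp [Multiset.coe_count])]
  simp [pvInterCard]

-- ===== VERDICT (by name: the statement is the Claim_ definition above) =====
theorem count_permutations_overlap_spec : Claim_equal_count_permutations_overlap := by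
  intro seq1 seq2 _
  unfold Spec_count_permutations_overlap
  rw [a_eq_interCard, b_eq_interCard]
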